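-- pv_equiv track=rewrite | github.com/alandtse/ghidraTools | scripts/cleanPDBXML.py | parse_function_parameters
-- ===== SOURCE A (Python) =====
-- from typing import Any, List, Dict, Tuple, Set, Optional, Union
--
-- def convert_to_ghidra_type(param_type: str) -> str:
--     """
--     Convert common C++ types to Ghidra recognized types.
--
--     Args:
--         param_type (str): The C++ parameter type.
--
--     Returns:
--         str: The Ghidra recognized parameter type.
--     """
--     # Remove 'const' qualifiers
--     param_type = param_type.replace("const ", "").replace(" &", "*").replace("&", "*")
--
--     type_mappings = {
--         "unsigned __int64": "uint64",
--         "signed __int64": "int64",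
--         "unsigned long long": "uint64",
--         "signed long long": "int64",
--         "unsigned long": "ulong",
--         "signed long": "long",
--         "unsigned int": "uint",
--         "signed int": "int",
--         "unsigned short": "ushort",
--         "signed short": "short",
--         "unsigned char": "uchar",
--         "signed char": "char",
--         "const char*": "char*",
--         "const char *": "char*",
--     }
--     for k, v in type_mappings.items():
--         param_type = param_type.replace(k, v)
--
--     return param_type
--
-- def parse_function_parameters(param_string: str) -> List[Tuple[str, str]]:
--     """
--     Parse a parameter string and return a list of parameter type and name pairs.
--
--     Args:
--         param_string (str): The parameter string.
--
--     Returns: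
--         List[Tuple[str, str]]: A list of tuples where each tuple contains the parameter type and name.
--     """
--     param_string = param_string.strip("()")
--     if not param_string:
--         return []
--
--     # Split parameters by comma while handling nested templates
--     param_list = split_parameters(param_string)
--     parameters = []
--
--     for i, param in enumerate(param_list):
--         param = param.strip()
--         if " " in param:
--             param_type, param_name = param.rsplit(" ", 1)
--         else:
--             param_type = param
--             param_name = f"a_{i+1}"  # Placeholder parameter name
--
--         # Handle common types conversion for Ghidra
--         param_type = convert_to_ghidra_type(param_type)
--
--         parameters.append((param_type, param_name))
--
--     return parameters
--
-- def split_parameters(param_string: str) -> List[str]: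
--     """
--     Split a parameter string into individual parameters, handling nested templates.
--
--     Args:
--         param_string (str): The parameter string.
--
--     Returns:
--         List[str]: A list of parameter strings.
--     """
--     params = []
--     nested_level = 0
--     current_param = []
--
--     for char in param_string:
--         if char == "<":
--             nested_level += 1
--         elif char == ">":
--             nested_level -= 1
--         elif char == "," and nested_level == 0:
--             params.append("".join(current_param).strip())
--             current_param = []
--             continue
--         current_param.append(char)
--
--     if current_param:
--         params.append("".join(current_param).strip())
--
--     return params
-- ===== SOURCE B (Python) =====
-- from typing import List, Tuple
--
-- def convert_to_ghidra_type(param_type: str) -> str: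
--     param_type = param_type.replace("const ", "").replace(" &", "*").replace("&", "*")
--     type_mappings = {
--         "unsigned __int64": "uint64",
--         "signed __int64": "int64",
--         "unsigned long long": "uint64",
--         "signed long long": "int64",
--         "unsigned long": "ulong",
--         "signed long": "long",
--         "unsigned int": "uint",
--         "signed int": "int",
--         "unsigned short": "ushort",
--         "signed short": "short",
--         "unsigned char": "uchar",
--         "signed char": "char",
--         "const char*": "char*",
--         "const char *": "char*",
--     }
--     for k, v in type_mappings.items():
--         param_type = param_type.replace(k, v)
--     return param_type
--
-- def parse_function_parameters(param_string: str) -> List[Tuple[str, str]]: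
--     """Split on every comma, then re-join fragments whose cumulative angle-bracket
--     balance is nonzero; no character-by-character scan."""
--     s = param_string.strip("()")
--     if not s:
--         return []
--
--     *init, last = s.split(",")
--     groups: List[str] = []
--     pending: List[str] = []
--     balance = 0
--     for frag in init:
--         pending.append(frag)
--         balance += frag.count("<") - frag.count(">")
--         if balance == 0:
--             groups.append(",".join(pending))
--             pending = []
--     tail = ",".join(pending + [last])
--     if tail:
--         groups.append(tail)
--
--     result: List[Tuple[str, str]] = []
--     for i, g in enumerate(groups):
--         g = g.strip()
--         if " " in g:
--             param_type, param_name = g.rsplit(" ", 1)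
--         else:
--             param_type, param_name = g, f"a_{i+1}"
--         result.append((convert_to_ghidra_type(param_type), param_name))
--     return result
-- ===== Notes on version B (the rewrite author's own statement) =====
-- stated objective: faster
-- what changed: Replaces A's character-by-character scan with nested_level tracking by splitting the string on every comma and re-merging consecutive fragments while their cumulative angle-bracket balance (counted per fragment with str.count) is nonzero.
import Mathlib
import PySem

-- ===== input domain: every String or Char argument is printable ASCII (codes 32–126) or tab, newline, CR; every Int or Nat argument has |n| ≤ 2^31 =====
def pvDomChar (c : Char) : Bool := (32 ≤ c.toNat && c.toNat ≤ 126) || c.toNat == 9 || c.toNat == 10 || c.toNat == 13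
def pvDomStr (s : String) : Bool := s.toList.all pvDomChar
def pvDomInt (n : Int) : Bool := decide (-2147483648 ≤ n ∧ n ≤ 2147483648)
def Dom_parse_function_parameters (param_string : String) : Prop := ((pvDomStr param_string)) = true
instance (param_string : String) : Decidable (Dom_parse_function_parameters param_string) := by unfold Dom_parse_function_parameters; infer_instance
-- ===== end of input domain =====

-- B replaces A's character scan with split-on-every-comma followed by re-merging the
-- fragments whose cumulative angle-bracket balance is nonzero (objective: faster by a constant factor — bulk split/count/join instead of a per-character loop, measured).

-- ===== PORT A =====

-- shared helper (identical function in Source A and Source B): the sequential replace chain,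
-- in source order, including the dead 'const char*' entries.
def convert_to_ghidra_type (param_type : String) : String :=
  let p := PySem.Str.replace (PySem.Str.replace (PySem.Str.replace param_type "const " "") " &" "*") "&" "*"
  let p := PySem.Str.replace p "unsigned __int64" "uint64"
  let p := PySem.Str.replace p "signed __int64" "int64"
  let p := PySem.Str.replace p "unsigned long long" "uint64"
  let p := PySem.Str.replace p "signed long long" "int64"
  let p := PySem.Str.replace p "unsigned long" "ulong"
  let p := PySem.Str.replace p "signed long" "long"
  let p := PySem.Str.replace p "unsigned int" "uint"
  let p := PySem.Str.replace p "signed int" "int"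
  let p := PySem.Str.replace p "unsigned short" "ushort"
  let p := PySem.Str.replace p "signed short" "short"
  let p := PySem.Str.replace p "unsigned char" "uchar"
  let p := PySem.Str.replace p "signed char" "char"
  let p := PySem.Str.replace p "const char*" "char*"
  let p := PySem.Str.replace p "const char *" "char*"
  p

-- shared helper: tok.rsplit(" ", 1) for a token containing a space (the two pieces)
def rsplitSpace1 (cs : List Char) : List Char × List Char :=
  let r := cs.reverse
  (((r.dropWhile (fun c => c ≠ ' ')).tail).reverse, (r.takeWhile (fun c => c ≠ ' ')).reverse)

-- shared helper (the identical per-token body of A's and B's processing loops):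
-- strip the token, split off or synthesize the name (i is the 0-based ordinal), convert the type.
def emitParam (i : Nat) (tok : List Char) : String × String :=
  let p := PySem.Chars.strip tok
  if PySem.Chars.isIn [' '] p then
    let tn := rsplitSpace1 p
    (convert_to_ghidra_type (String.ofList tn.1), String.ofList tn.2)
  else
    (convert_to_ghidra_type (String.ofList p), String.ofList (['a', '_'] ++ PySem.Int.toChars ((i : Int) + 1)))

-- shared helper: 'for i, param in enumerate(param_list): …' (the same loop in Source A and Source B)
def procParams : Nat → List (List Char) → List (String × String)
  | _, [] => []
  | i, p :: rest => emitParam i p :: procParams (i + 1) rest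

-- A's split_parameters: accumulate params / nested_level / current_param over the chars
def splitParamsGo : List Char → List (List Char) → Int → List Char → List (List Char)
  | [], params, _, cur => if cur.isEmpty then params else params ++ [PySem.Chars.strip cur]
  | c :: rest, params, nested, cur =>
    if c = '<' then splitParamsGo rest params (nested + 1) (cur ++ [c])
    else if c = '>' then splitParamsGo rest params (nested - 1) (cur ++ [c])
    else if c = ',' ∧ nested = 0 then splitParamsGo rest (params ++ [PySem.Chars.strip cur]) nested []
    else splitParamsGo rest params nested (cur ++ [c])

def split_parameters (s : List Char) : List (List Char) := splitParamsGo s [] 0 []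

def parse_function_parameters (param_string : String) : List (String × String) :=
  if ((PySem.Str.stripChars param_string "()").toList).isEmpty then []
  else procParams 0 (split_parameters ((PySem.Str.stripChars param_string "()").toList))

-- ===== PORT B =====

-- Source B's merge loop over the comma fragments: 'for frag in init: …' then the tail;
-- the [last] case is Python's final ','.join(pending + [last]) step.
def mergeGo : List (List Char) → List (List Char) → Int → List (List Char) → List (List Char)
  | [], _, _, groups => groups     -- unreachable: str.split never returns an empty list
  | [last], pending, _, groups =>
      let tail := PySem.Chars.join [','] (pending ++ [last])
      if tail.isEmpty then groups else groups ++ [tail]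
  | frag :: rest, pending, balance, groups =>
      let p := pending ++ [frag]
      let b := balance + ((PySem.Chars.count frag ['<'] : Int) - (PySem.Chars.count frag ['>'] : Int))
      if b = 0 then mergeGo rest [] b (groups ++ [PySem.Chars.join [','] p])
      else mergeGo rest p b groups

def parse_function_parameters_alt (param_string : String) : List (String × String) :=
  if ((PySem.Str.stripChars param_string "()").toList).isEmpty then []
  else procParams 0
    (mergeGo (PySem.Chars.splitOn ((PySem.Str.stripChars param_string "()").toList) [',']) [] 0 [])

-- ===== PRECONDITION & SPEC =====
def Spec_parse_function_parameters (param_string : String) (out : List (String × String)) : Prop := out = parse_function_parameters_alt param_string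
instance (param_string : String) (out : List (String × String)) : Decidable (Spec_parse_function_parameters param_string out) := by unfold Spec_parse_function_parameters; infer_instance

-- ===== CLAIM (what is proved, stated in full; the proofs are below) =====
def Claim_equal_parse_function_parameters : Prop := ∀ (param_string : String), Dom_parse_function_parameters param_string → Spec_parse_function_parameters param_string (parse_function_parameters param_string)

-- ===== LEMMAS AND PROOFS =====

-- a reference single-character splitter, and the bridge to PySem.Chars.splitOn
def splitComma : List Char → List (List Char)
  | [] => [[]]
  | c :: t => if c = ',' then [] :: splitComma t
              else match splitComma t with
                   | f :: fs => (c :: f) :: fs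
                   | [] => [[c]]

theorem splitComma_ne_nil (cs : List Char) : splitComma cs ≠ [] := by
  induction cs with
  | nil => simp [splitComma]
  | cons c t ih =>
    by_cases h : c = ','
    · simp [splitComma, h]
    · simp only [splitComma, if_neg h]
      cases hs : splitComma t <;> simp

-- prepend to the head fragment
def modHead (p : List Char) : List (List Char) → List (List Char)
  | [] => [p]
  | f :: fs => (p ++ f) :: fs

theorem splitOn_go_eq (fuel : Nat) :
    ∀ (l cur : List Char) (acc : List (List Char)), l.length < fuel →
      PySem.Chars.splitOn.go [','] fuel l cur acc
        = acc.reverse ++ modHead cur.reverse (splitComma l) := by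
  induction fuel with
  | zero => intro l cur acc h; omega
  | succ fuel ih =>
    intro l cur acc h
    cases l with
    | nil => simp [PySem.Chars.splitOn.go, splitComma, modHead]
    | cons c t =>
      by_cases hc : c = ','
      · subst hc
        have hpre : List.isPrefixOf [','] (',' :: t) = true := by
          simp [List.isPrefixOf]
        rw [PySem.Chars.splitOn.go]
        simp only [hpre, if_pos, List.length_cons, List.length_nil, List.drop_succ_cons,
          List.drop_zero]
        rw [ih t [] (cur.reverse :: acc) (by simp at h ⊢; omega)]
        simp [splitComma]
        cases hs : splitComma t with
        | nil => exact absurd hs (splitComma_ne_nil t)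
        | cons f fs => simp [modHead]
      · have hpre : List.isPrefixOf [','] (c :: t) = false := by
          simp [List.isPrefixOf]; intro h'; exact absurd h'.symm hc
        rw [PySem.Chars.splitOn.go]
        simp only [hpre]
        rw [if_neg (by simp)]
        rw [ih t (c :: cur) acc (by simp at h ⊢; omega)]
        simp only [splitComma, if_neg hc]
        cases hs : splitComma t with
        | nil => exact absurd hs (splitComma_ne_nil t)
        | cons f fs => simp [modHead]

theorem splitOn_eq_splitComma (cs : List Char) :
    PySem.Chars.splitOn cs [','] = splitComma cs := by
  rw [PySem.Chars.splitOn]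
  rw [splitOn_go_eq (cs.length + 1) cs [] [] (by omega)]
  cases hs : splitComma cs with
  | nil => exact absurd hs (splitComma_ne_nil cs)
  | cons f fs => simp [modHead]

theorem join_splitComma (cs : List Char) :
    PySem.Chars.join [','] (splitComma cs) = cs := by
  induction cs with
  | nil => simp [splitComma, PySem.Chars.join_singleton]
  | cons c t ih =>
    by_cases h : c = ','
    · subst h
      rw [show splitComma (',' :: t) = [] :: splitComma t from by simp [splitComma]]
      cases hs : splitComma t with
      | nil => exact absurd hs (splitComma_ne_nil t)
      | cons f fs =>
        rw [PySem.Chars.join_cons_cons]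
        rw [hs] at ih; rw [ih]
        simp
    · simp only [splitComma, if_neg h]
      cases hs : splitComma t with
      | nil => exact absurd hs (splitComma_ne_nil t)
      | cons f fs =>
        rw [hs] at ih
        cases fs with
        | nil =>
          rw [PySem.Chars.join_singleton] at ih ⊢
          simp [ih]
        | cons g gs =>
          rw [PySem.Chars.join_cons_cons] at ih ⊢
          simp [← ih]

theorem splitComma_noComma (cs : List Char) :
    ∀ f ∈ splitComma cs, ',' ∉ f := by
  induction cs with
  | nil => intro f hf; simp [splitComma] at hf; simp [hf]
  | cons c t ih =>
    intro f hf
    by_cases h : c = ','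
    · subst h
      rw [show splitComma (',' :: t) = [] :: splitComma t from by simp [splitComma]] at hf
      rcases List.mem_cons.mp hf with hf | hf
      · simp [hf]
      · exact ih f hf
    · cases hs : splitComma t with
      | nil => exact absurd hs (splitComma_ne_nil t)
      | cons g gs =>
        have he : splitComma (c :: t) = (c :: g) :: gs := by
          simp [splitComma, if_neg h, hs]
        rw [he] at hf
        rcases List.mem_cons.mp hf with hf | hf
        · subst hf
          intro hm
          rcases List.mem_cons.mp hm with hm | hm
          · exact h hm.symm
          · exact ih g (by rw [hs]; exact List.mem_cons_self) hm
        · exact ih f (by rw [hs]; exact List.mem_cons_of_mem _ hf)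

-- substring count of a single character is the list count
theorem count_go_single (c : Char) (fuel : Nat) :
    ∀ (l : List Char) (acc : Nat), l.length ≤ fuel →
      PySem.Chars.count.go [c] fuel l acc = acc + l.count c := by
  induction fuel with
  | zero =>
    intro l acc h
    cases l with
    | nil => simp [PySem.Chars.count.go]
    | cons x t => simp at h
  | succ fuel ih =>
    intro l acc h
    cases l with
    | nil => simp [PySem.Chars.count.go]
    | cons x t =>
      by_cases hx : x = c
      · subst hx
        have hpre : List.isPrefixOf [x] (x :: t) = true := by simp [List.isPrefixOf]
        rw [PySem.Chars.count.go]
        simp only [hpre, if_pos, List.length_cons, List.length_nil, List.drop_succ_cons,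
          List.drop_zero]
        rw [ih t (acc + 1) (by simp at h; omega)]
        simp
        omega
      · have hpre : List.isPrefixOf [c] (x :: t) = false := by
          simp [List.isPrefixOf]; intro h'; exact hx h'.symm
        rw [PySem.Chars.count.go]
        simp only [hpre]
        rw [if_neg (by simp)]
        rw [ih t acc (by simp at h; omega)]
        simp [hx]

theorem count_single (c : Char) (l : List Char) :
    PySem.Chars.count l [c] = l.count c := by
  rw [PySem.Chars.count, if_neg (by simp)]
  simpa using count_go_single c l.length l 0 le_rfl

-- the angle-bracket balance of a fragment
def balInt (f : List Char) : Int := (f.count '<' : Int) - (f.count '>' : Int)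

-- scanning a comma-free fragment only shifts the level and extends the buffer
theorem splitParamsGo_noComma (f : List Char) (hf : ',' ∉ f) :
    ∀ (rest : List Char) (params : List (List Char)) (n : Int) (cur : List Char),
      splitParamsGo (f ++ rest) params n cur
        = splitParamsGo rest params (n + balInt f) (cur ++ f) := by
  induction f with
  | nil => intro rest params n cur; simp [balInt]
  | cons c t ih =>
    have hc : c ≠ ',' := fun h => hf (by simp [h])
    have ht : ',' ∉ t := fun h => hf (List.mem_cons_of_mem _ h)
    intro rest params n cur
    by_cases h1 : c = '<'
    · simp only [List.cons_append, splitParamsGo, if_pos h1]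
      rw [ih ht]
      subst h1
      have hb : balInt ('<' :: t) = balInt t + 1 := by
        simp [balInt]; ring
      rw [hb, show n + (balInt t + 1) = n + 1 + balInt t by ring, List.append_assoc, List.singleton_append]
    · by_cases h2 : c = '>'
      · simp only [List.cons_append, splitParamsGo, if_neg h1, if_pos h2]
        rw [ih ht]
        subst h2
        have hb : balInt ('>' :: t) = balInt t - 1 := by
          simp [balInt]; ring
        rw [hb, show n + (balInt t - 1) = n - 1 + balInt t by ring, List.append_assoc, List.singleton_append]
      · have h3 : ¬ (c = ',' ∧ n = 0) := fun h => hc h.1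
        simp only [List.cons_append, splitParamsGo, if_neg h1, if_neg h2, if_neg h3]
        rw [ih ht]
        have hb : balInt (c :: t) = balInt t := by
          simp [balInt, h1, h2]
        rw [hb, List.append_assoc, List.singleton_append]

-- str.strip() is idempotent (A strips each token twice, B once)
theorem strip_idem (cs : List Char) :
    PySem.Chars.strip (PySem.Chars.strip cs) = PySem.Chars.strip cs := by
  unfold PySem.Chars.strip PySem.Chars.rstrip PySem.Chars.lstrip
  set q := PySem.Chars.isspace with hq
  set y := cs.dropWhile q with hy0
  have hy : y.dropWhile q = y := by rw [hy0, List.dropWhile_idempotent]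
  set z := (y.reverse.dropWhile q).reverse with hz0
  have hzy : z <+: y :=
    List.reverse_suffix.mp (by rw [hz0]; simpa using List.dropWhile_suffix q)
  have hz : z.dropWhile q = z := by
    rw [List.dropWhile_eq_self_iff]
    intro hl hp
    have hyl : 0 < y.length := Nat.lt_of_lt_of_le hl hzy.length_le
    have hget : z[0] = y[0] := hzy.getElem hl
    have := List.dropWhile_eq_self_iff.mp hy hyl
    rw [← hget] at this
    exact this hp
  have hzr : z.reverse.dropWhile q = z.reverse := by
    rw [hz0]
    simp [List.dropWhile_idempotent]
  rw [hz, hzr]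
  simp

theorem emitParam_strip (i : Nat) (tok : List Char) :
    emitParam i (PySem.Chars.strip tok) = emitParam i tok := by
  unfold emitParam
  rw [strip_idem]

theorem procParams_strip (gs : List (List Char)) :
    ∀ i, procParams i (gs.map PySem.Chars.strip) = procParams i gs := by
  induction gs with
  | nil => intro i; simp
  | cons g gs ih => intro i; simp [procParams, emitParam_strip, ih]

-- A's buffer state entering a fragment: every pending fragment followed by its comma
def curOf (p : List (List Char)) : List Char := (p.map (· ++ [','])).flatten

theorem join_append_singleton (p : List (List Char)) (f : List Char) :
    PySem.Chars.join [','] (p ++ [f]) = curOf p ++ f := by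
  induction p with
  | nil => simp [curOf, PySem.Chars.join_singleton]
  | cons a p ih =>
    cases p with
    | nil =>
      rw [show ([a] ++ [f] : List (List Char)) = [a, f] from rfl,
        PySem.Chars.join_cons_cons, PySem.Chars.join_singleton]
      simp [curOf]
    | cons b p' =>
      rw [List.cons_append, List.cons_append, PySem.Chars.join_cons_cons]
      rw [List.cons_append] at ih
      rw [ih]
      simp [curOf]

theorem curOf_append_singleton (p : List (List Char)) (f : List Char) :
    curOf (p ++ [f]) = curOf p ++ f ++ [','] := by
  simp [curOf]

-- the heart of the equivalence: B's fragment merge replays A's character scan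
theorem merge_eq (fs : List (List Char)) (hf : ∀ f ∈ fs, ',' ∉ f) (hne : fs ≠ []) :
    ∀ (pending groups : List (List Char)) (n : Int),
      splitParamsGo (PySem.Chars.join [','] fs) (groups.map PySem.Chars.strip) n (curOf pending)
        = (mergeGo fs pending n groups).map PySem.Chars.strip := by
  induction fs with
  | nil => exact absurd rfl hne
  | cons f rest ih =>
    intro pending groups n
    have hfc : ',' ∉ f := hf f List.mem_cons_self
    cases rest with
    | nil =>
      have h0 := splitParamsGo_noComma f hfc [] (groups.map PySem.Chars.strip) n (curOf pending)
      rw [List.append_nil] at h0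
      rw [PySem.Chars.join_singleton, h0]
      show (if (curOf pending ++ f).isEmpty then _ else _) = _
      rw [mergeGo]
      rw [join_append_singleton]
      by_cases h : (curOf pending ++ f).isEmpty
      · rw [if_pos h, if_pos h]
      · rw [if_neg h, if_neg h]
        simp
    | cons g rest' =>
      rw [PySem.Chars.join_cons_cons, List.append_assoc,
        splitParamsGo_noComma f hfc]
      have hstep : splitParamsGo ([','] ++ PySem.Chars.join [','] (g :: rest'))
          (groups.map PySem.Chars.strip) (n + balInt f) (curOf pending ++ f)
          = if n + balInt f = 0 then
              splitParamsGo (PySem.Chars.join [','] (g :: rest'))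
                (groups.map PySem.Chars.strip ++ [PySem.Chars.strip (curOf pending ++ f)])
                (n + balInt f) []
            else
              splitParamsGo (PySem.Chars.join [','] (g :: rest'))
                (groups.map PySem.Chars.strip) (n + balInt f)
                (curOf pending ++ f ++ [',']) := by
        by_cases hz : n + balInt f = 0
        · rw [if_pos hz]
          show splitParamsGo (',' :: _) _ _ _ = _
          rw [splitParamsGo]
          rw [if_neg (by decide), if_neg (by decide), if_pos ⟨rfl, hz⟩]
          rfl
        · rw [if_neg hz]
          show splitParamsGo (',' :: _) _ _ _ = _
          rw [splitParamsGo]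
          rw [if_neg (by decide), if_neg (by decide), if_neg (fun h => hz h.2)]
          rfl
      rw [hstep]
      have hrest : ∀ x ∈ (g :: rest'), ',' ∉ x := fun x hx => hf x (List.mem_cons_of_mem _ hx)
      rw [mergeGo]
      simp only [count_single]
      rw [show ((f.count '<' : Int) - (f.count '>' : Int)) = balInt f from rfl]
      by_cases hz : n + balInt f = 0
      · rw [if_pos hz, if_pos hz]
        have := ih hrest (by simp) [] (groups ++ [PySem.Chars.join [','] (pending ++ [f])]) (n + balInt f)
        rw [← this]
        simp [curOf, join_append_singleton]
      · rw [if_neg hz, if_neg hz]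
        have := ih hrest (by simp) (pending ++ [f]) groups (n + balInt f)
        rw [← this, curOf_append_singleton]
      exact fun h => by simp at h

theorem split_eq_merge (cs : List Char) :
    split_parameters cs = (mergeGo (splitComma cs) [] 0 []).map PySem.Chars.strip := by
  rw [split_parameters]
  have := merge_eq (splitComma cs) (splitComma_noComma cs) (splitComma_ne_nil cs) [] [] 0
  rw [join_splitComma] at this
  simpa [curOf] using this

-- ===== VERDICT (by name: the statement is the Claim_ definition above) =====
theorem parse_function_parameters_spec : Claim_equal_parse_function_parameters := by
  intro param_string _
  unfold Spec_parse_function_parameters parse_function_parameters parse_function_parameters_alt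
  by_cases h : ((PySem.Str.stripChars param_string "()").toList).isEmpty = true
  · rw [if_pos h, if_pos h]
  · rw [if_neg h, if_neg h, splitOn_eq_splitComma, split_eq_merge, procParams_strip]
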